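-- pv_equiv track=rewrite | github.com/haoyucn/PersonalProjects | pattern.py | find_occurance
-- ===== SOURCE A (Python) =====
-- def find_occurance(input):
--     occ = {}
--     duplist = []
--     for i in range(len(input)):
--         f = input[i][0]
--         l = input[i][1]
--         # if it is already in the occerance list
--         if f in occ.keys():
--             if l in occ[f].keys():
--                 # put the pair in duplist and record position
--                 occ[f][l].append(i)
--                 duplist.append([f, l])
--             else:
--                 occ[f][l] = [i]
--         else:
--             # put create the pair position
--             occ[f] = {}
--             occ[f][l] = [i]
--     return occ, duplist
-- ===== SOURCE B (Python) =====
-- def find_occurance(input):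
--     # pass 1: flat table keyed by the (first, second) pair -> list of positions
--     flat = {}
--     duplist = []
--     for i, row in enumerate(input):
--         key = (row[0], row[1])
--         if key in flat:
--             flat[key].append(i)
--             duplist.append([row[0], row[1]])
--         else:
--             flat[key] = [i]
--     # pass 2: reshape the flat table into the nested occurrence dict
--     occ = {}
--     for (f, l), positions in flat.items():
--         occ.setdefault(f, {})[l] = positions
--     return occ, duplist
-- ===== Notes on version B (the rewrite author's own statement) =====
-- stated objective: alternative
-- what changed: A builds the nested occ dict directly with membership tests on two dict levels per element; B builds a flat dict keyed by the (first, second) tuple in one pass (which also yields duplist) and then reshapes that table into the nested dict in a second pass over its items.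
import Mathlib
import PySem

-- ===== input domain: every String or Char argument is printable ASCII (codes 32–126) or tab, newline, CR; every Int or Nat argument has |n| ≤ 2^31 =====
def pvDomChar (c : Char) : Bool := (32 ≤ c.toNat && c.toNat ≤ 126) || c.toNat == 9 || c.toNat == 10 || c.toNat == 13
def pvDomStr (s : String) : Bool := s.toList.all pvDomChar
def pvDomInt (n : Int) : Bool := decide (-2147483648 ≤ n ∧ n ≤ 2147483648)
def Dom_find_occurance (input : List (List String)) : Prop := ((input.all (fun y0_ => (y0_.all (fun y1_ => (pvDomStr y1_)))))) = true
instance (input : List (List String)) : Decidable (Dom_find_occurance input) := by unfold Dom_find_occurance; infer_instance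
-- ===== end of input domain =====

-- B replaces A's direct nested-dict construction by a flat (first, second)-keyed table built in
-- one pass and a second reshaping pass into the nested dict (objective: alternative decomposition).

-- ===== PORT A =====
-- Loop body of A; row indexing input[i], row[0], row[1] is ported with pyGetD, exact under
-- Pre_find_occurance (every row has ≥ 2 entries; Python raises IndexError otherwise).
def pvStepA
    (st : PySem.Dict String (PySem.Dict String (List Int)) × List (List String))
    (p : Int × List String) :
    PySem.Dict String (PySem.Dict String (List Int)) × List (List String) :=
  let f := PySem.List.pyGetD p.2 0 ""
  let l := PySem.List.pyGetD p.2 1 ""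
  if st.1.contains f then
    if (st.1.getD f PySem.Dict.empty).contains l then
      (st.1.insert f ((st.1.getD f PySem.Dict.empty).insert l
          ((st.1.getD f PySem.Dict.empty).getD l [] ++ [p.1])), st.2 ++ [[f, l]])
    else
      (st.1.insert f ((st.1.getD f PySem.Dict.empty).insert l [p.1]), st.2)
  else
    (st.1.insert f (PySem.Dict.empty.insert l [p.1]), st.2)

def find_occurance (input : List (List String)) :
    (List (String × List (String × List Int))) × List (List String) :=
  let res := (PySem.List.pyRange 0 (PySem.List.len input)).foldl
      (fun st i => pvStepA st (i, PySem.List.pyGetD input i []))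
      (PySem.Dict.empty, [])
  (res.1.items.map (fun q => (q.1, q.2.items)), res.2)

-- ===== PORT B =====
-- First pass of Source B: flat table keyed by (row[0], row[1]) plus duplist.
def pvStepB
    (st : PySem.Dict (String × String) (List Int) × List (List String))
    (p : Int × List String) :
    PySem.Dict (String × String) (List Int) × List (List String) :=
  let f := PySem.List.pyGetD p.2 0 ""
  let l := PySem.List.pyGetD p.2 1 ""
  if st.1.contains (f, l) then
    (st.1.modify (f, l) [] (fun ps => ps ++ [p.1]), st.2 ++ [[f, l]])
  else
    (st.1.insert (f, l) [p.1], st.2)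

-- Second pass of Source B: occ.setdefault(f, {})[l] = positions
def pvStepR (occ : PySem.Dict String (PySem.Dict String (List Int)))
    (q : (String × String) × List Int) : PySem.Dict String (PySem.Dict String (List Int)) :=
  (occ.setdefault q.1.1 PySem.Dict.empty).insert q.1.1
    (((occ.setdefault q.1.1 PySem.Dict.empty).getD q.1.1 PySem.Dict.empty).insert q.1.2 q.2)

def pvReshape (fl : PySem.Dict (String × String) (List Int)) :
    PySem.Dict String (PySem.Dict String (List Int)) :=
  fl.items.foldl pvStepR PySem.Dict.empty

def find_occurance_alt (input : List (List String)) :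
    (List (String × List (String × List Int))) × List (List String) :=
  let fl := (PySem.List.enumerate input).foldl pvStepB (PySem.Dict.empty, [])
  let occ := pvReshape fl.1
  (occ.items.map (fun q => (q.1, q.2.items)), fl.2)

-- ===== PRECONDITION & SPEC =====
-- Pre_ excludes exactly the rows on which Python A raises IndexError (a row with < 2 entries).
def Pre_find_occurance (input : List (List String)) : Prop :=
  ∀ row ∈ input, 2 ≤ row.length
instance (input : List (List String)) : Decidable (Pre_find_occurance input) := by
  unfold Pre_find_occurance; infer_instance

def pvWitness_find_occurance : List (List String) := [["a", "b"], ["a", "b"], ["a", "c"]]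

def Spec_find_occurance (input : List (List String)) (out : (List (String × List (String × List Int))) × List (List String)) : Prop := out = find_occurance_alt input
instance (input : List (List String)) (out : (List (String × List (String × List Int))) × List (List String)) : Decidable (Spec_find_occurance input out) := by unfold Spec_find_occurance; infer_instance

-- ===== CLAIM (what is proved, stated in full; the proofs are below) =====
def Claim_equal_find_occurance : Prop := ∀ (input : List (List String)), Dom_find_occurance input → Pre_find_occurance input → Spec_find_occurance input (find_occurance input)

-- ===== LEMMAS AND PROOFS =====

-- setdefault-then-assign collapses to a single nested insert
lemma pvStepR_eq (occ : PySem.Dict String (PySem.Dict String (List Int)))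
    (q : (String × String) × List Int) :
    pvStepR occ q
      = occ.insert q.1.1 ((occ.getD q.1.1 PySem.Dict.empty).insert q.1.2 q.2) := by
  unfold pvStepR
  by_cases h : occ.contains q.1.1 = true
  · rw [PySem.Dict.setdefault_of_contains _ _ h]
  · rw [PySem.Dict.setdefault_of_not_contains _ _ (by simpa using h)]
    rw [PySem.Dict.getD_insert_self, PySem.Dict.insert_insert_self,
        PySem.Dict.getD_of_not_contains _ _ (by simpa using h)]

-- two inserts at distinct keys commute when the first key is already present
lemma pv_insert_comm_of_contains {κ ν : Type} [BEq κ] [LawfulBEq κ]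
    (d : PySem.Dict κ ν) (k k' : κ) (X Y : ν) (hne : k ≠ k') (hc : d.contains k = true) :
    (d.insert k X).insert k' Y = (d.insert k' Y).insert k X := by
  apply PySem.Dict.ext
  by_cases hc' : d.contains k' = true
  · rw [PySem.Dict.items_insert_of_contains _ Y
        (by simp [PySem.Dict.contains_insert, hc']),
      PySem.Dict.items_insert_of_contains _ X hc,
      PySem.Dict.items_insert_of_contains _ X
        (by simp [PySem.Dict.contains_insert, hc]),
      PySem.Dict.items_insert_of_contains _ Y hc', List.map_map, List.map_map]
    apply List.map_congr_left
    intro p _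
    by_cases h1 : p.1 = k <;> by_cases h2 : p.1 = k' <;>
      simp_all [Function.comp, Ne.symm hne]
  · have hb : (k' == k) = false := by simp [Ne.symm hne]
    rw [PySem.Dict.items_insert_of_not_contains _ Y
        (by simp [PySem.Dict.contains_insert, hb]; simpa using hc'),
      PySem.Dict.items_insert_of_contains _ X hc,
      PySem.Dict.items_insert_of_contains _ X
        (by simp [PySem.Dict.contains_insert, hc]),
      PySem.Dict.items_insert_of_not_contains _ Y (by simpa using hc'),
      List.map_append]
    simp [hb]

-- contains-pair characterisation through one reshape step
lemma pvStepR_contains (occ : PySem.Dict String (PySem.Dict String (List Int)))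
    (q : (String × String) × List Int) (f l : String) :
    ((pvStepR occ q).contains f = true ∧
        ((pvStepR occ q).getD f PySem.Dict.empty).contains l = true)
      ↔ ((occ.contains f = true ∧ (occ.getD f PySem.Dict.empty).contains l = true)
          ∨ q.1 = (f, l)) := by
  rcases q with ⟨⟨f', l'⟩, v⟩
  rw [pvStepR_eq]
  simp only []
  by_cases hf : f = f'
  · subst hf
    by_cases hc : occ.contains f = true
    · by_cases hl : l = l'
      · simp [PySem.Dict.getD_insert_self, hc, hl]
      · simp [PySem.Dict.contains_insert, PySem.Dict.getD_insert_self, hc, hl]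
        exact fun h => absurd h.symm hl
    · have h0 : occ.getD f PySem.Dict.empty = PySem.Dict.empty :=
        PySem.Dict.getD_of_not_contains _ _ (by simpa using hc)
      by_cases hl : l = l'
      · simp [PySem.Dict.getD_insert_self, hc, hl, h0]
      · simp [PySem.Dict.contains_insert, PySem.Dict.getD_insert_self, hc, hl, h0,
          PySem.Dict.contains_empty]
        exact fun h => absurd h.symm hl
  · simp [PySem.Dict.contains_insert, PySem.Dict.getD_insert_of_ne _ _ _ hf, hf]
    exact fun h _ => absurd h.symm hf

lemma pv_foldR_contains (L : List ((String × String) × List Int)) :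
    ∀ (occ0 : PySem.Dict String (PySem.Dict String (List Int))) (f l : String),
    (((L.foldl pvStepR occ0).contains f = true ∧
        ((L.foldl pvStepR occ0).getD f PySem.Dict.empty).contains l = true)
      ↔ ((occ0.contains f = true ∧ (occ0.getD f PySem.Dict.empty).contains l = true)
          ∨ (f, l) ∈ L.map Prod.fst)) := by
  induction L with
  | nil => intro occ0 f l; simp
  | cons q L ih =>
    intro occ0 f l
    simp only [List.foldl_cons, List.map_cons, List.mem_cons]
    rw [ih, pvStepR_contains]
    tauto

-- folding over pairs whose key is not (f, l) does not change the (f, l) cell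
lemma pv_foldR_getD_of_not_mem (L : List ((String × String) × List Int)) :
    ∀ (occ : PySem.Dict String (PySem.Dict String (List Int))) (f l : String),
    (∀ p ∈ L, p.1 ≠ (f, l)) →
    ((L.foldl pvStepR occ).getD f PySem.Dict.empty).getD l []
      = (occ.getD f PySem.Dict.empty).getD l [] := by
  induction L with
  | nil => intro occ f l _; rfl
  | cons p L ih =>
    intro occ f l h
    simp only [List.foldl_cons]
    rw [ih _ f l fun r hr => h r (List.mem_cons_of_mem _ hr)]
    have hp : p.1 ≠ (f, l) := h p (List.mem_cons_self ..)
    rcases p with ⟨⟨pf, pl⟩, pv⟩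
    rw [pvStepR_eq]
    simp only []
    by_cases hf : f = pf
    · subst hf
      have hl : l ≠ pl := by
        intro hl; exact hp (by rw [hl])
      rw [PySem.Dict.getD_insert_self, PySem.Dict.getD_insert_of_ne _ _ _ hl]
    · rw [PySem.Dict.getD_insert_of_ne _ _ _ hf]

-- the (f, l) cell of the reshaped dict carries the flat table's value
lemma pv_foldR_getD (L : List ((String × String) × List Int)) :
    ∀ (occ0 : PySem.Dict String (PySem.Dict String (List Int))) (f l : String) (v : List Int),
    ((f, l), v) ∈ L → (L.map Prod.fst).Nodup →
    ((L.foldl pvStepR occ0).getD f PySem.Dict.empty).getD l [] = v := by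
  induction L with
  | nil => intro occ0 f l v h _; simp at h
  | cons q L ih =>
    intro occ0 f l v h hnd
    simp only [List.map_cons, List.nodup_cons] at hnd
    simp only [List.foldl_cons]
    rcases List.mem_cons.mp h with h1 | h1
    · have hq1 : q.1 = (f, l) := by rw [← h1]
      have hnotin : ∀ p ∈ L, p.1 ≠ (f, l) := by
        intro p hp hpe
        apply hnd.1
        rw [hq1, ← hpe]
        exact List.mem_map_of_mem hp
      rw [pv_foldR_getD_of_not_mem L _ f l hnotin, ← h1, pvStepR_eq]
      simp only []
      rw [PySem.Dict.getD_insert_self, PySem.Dict.getD_insert_self]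
    · exact ih _ f l v h1 hnd.2

-- the contained-pair property is preserved by a reshape step
lemma pvStepR_pres (occ : PySem.Dict String (PySem.Dict String (List Int)))
    (q : (String × String) × List Int) (f l : String)
    (h1 : occ.contains f = true)
    (h2 : (occ.getD f PySem.Dict.empty).contains l = true) :
    (pvStepR occ q).contains f = true ∧
      ((pvStepR occ q).getD f PySem.Dict.empty).contains l = true :=
  (pvStepR_contains occ q f l).mpr (Or.inl ⟨h1, h2⟩)

-- a nested (f, l)-insert commutes with one reshape step at a different pair
lemma pvStepR_update_comm (occ : PySem.Dict String (PySem.Dict String (List Int)))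
    (f l : String) (new : List Int) (p : (String × String) × List Int)
    (hp : p.1 ≠ (f, l)) (h1 : occ.contains f = true)
    (h2 : (occ.getD f PySem.Dict.empty).contains l = true) :
    pvStepR (occ.insert f ((occ.getD f PySem.Dict.empty).insert l new)) p
      = (pvStepR occ p).insert f
          (((pvStepR occ p).getD f PySem.Dict.empty).insert l new) := by
  rcases p with ⟨⟨pf, pl⟩, pv⟩
  rw [pvStepR_eq, pvStepR_eq]
  simp only []
  by_cases hf : pf = f
  · subst hf
    have hl : l ≠ pl := by
      intro hl; exact hp (by rw [← hl])
    rw [PySem.Dict.getD_insert_self, PySem.Dict.insert_insert_self,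
        PySem.Dict.getD_insert_self, PySem.Dict.insert_insert_self]
    exact congrArg _ (pv_insert_comm_of_contains _ l pl new pv hl h2)
  · rw [PySem.Dict.getD_insert_of_ne _ _ _ hf,
        PySem.Dict.getD_insert_of_ne _ _ _ (Ne.symm hf)]
    exact pv_insert_comm_of_contains occ f pf _ _ (Ne.symm hf) h1

-- an (f, l)-cell update commutes past a reshape fold that never touches (f, l)
lemma pv_foldR_insert_comm (rest : List ((String × String) × List Int)) :
    ∀ (occ : PySem.Dict String (PySem.Dict String (List Int))) (f l : String) (new : List Int),
    occ.contains f = true → (occ.getD f PySem.Dict.empty).contains l = true →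
    (∀ p ∈ rest, p.1 ≠ (f, l)) →
    rest.foldl pvStepR (occ.insert f ((occ.getD f PySem.Dict.empty).insert l new))
      = (rest.foldl pvStepR occ).insert f
          (((rest.foldl pvStepR occ).getD f PySem.Dict.empty).insert l new) := by
  induction rest with
  | nil => intro occ f l new _ _ _; rfl
  | cons p rest ih =>
    intro occ f l new h1 h2 hne
    simp only [List.foldl_cons]
    rw [pvStepR_update_comm occ f l new p (hne p (List.mem_cons_self ..)) h1 h2]
    have hpres := pvStepR_pres occ p f l h1 h2
    exact ih _ f l new hpres.1 hpres.2 fun r hr => hne r (List.mem_cons_of_mem _ hr)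

-- reshaping an items list with the (f, l) value replaced = reshape, then nested insert
lemma pv_foldR_map_update (L : List ((String × String) × List Int)) :
    ∀ (occ0 : PySem.Dict String (PySem.Dict String (List Int))) (f l : String) (new : List Int),
    (f, l) ∈ L.map Prod.fst → (L.map Prod.fst).Nodup →
    (L.map (fun p => if p.1 == (f, l) then ((f, l), new) else p)).foldl pvStepR occ0
      = (L.foldl pvStepR occ0).insert f
          (((L.foldl pvStepR occ0).getD f PySem.Dict.empty).insert l new) := by
  induction L with
  | nil => intro occ0 f l new h _; simp at h
  | cons q L ih =>
    intro occ0 f l new hm hnd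
    simp only [List.map_cons, List.nodup_cons] at hnd
    simp only [List.map_cons, List.foldl_cons]
    by_cases hq : q.1 = (f, l)
    · have hnotin : (f, l) ∉ L.map Prod.fst := hq ▸ hnd.1
      have hmapid : L.map (fun p => if p.1 == (f, l) then ((f, l), new) else p) = L := by
        conv_rhs => rw [← List.map_id L]
        apply List.map_congr_left
        intro p hp
        have hpe : p.1 ≠ (f, l) := fun he => hnotin (he ▸ List.mem_map_of_mem hp)
        simp [hpe]
      rw [hmapid, show (if q.1 == (f, l) then ((f, l), new) else q) = ((f, l), new) by
        simp [hq]]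
      have hbase : pvStepR occ0 ((f, l), new)
          = (pvStepR occ0 q).insert f
              (((pvStepR occ0 q).getD f PySem.Dict.empty).insert l new) := by
        rw [pvStepR_eq, pvStepR_eq, hq]
        simp [PySem.Dict.getD_insert_self, PySem.Dict.insert_insert_self]
      rw [hbase]
      have hpres := (pvStepR_contains occ0 q f l).mpr (Or.inr hq)
      exact pv_foldR_insert_comm L _ f l new hpres.1 hpres.2
        fun p hp hpe => hnotin (hpe ▸ List.mem_map_of_mem hp)
    · have hm' : (f, l) ∈ L.map Prod.fst := by
        rcases List.mem_cons.mp hm with h1 | h1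
        · exact absurd h1.symm hq
        · exact h1
      rw [show (if q.1 == (f, l) then ((f, l), new) else q) = q by simp [hq]]
      exact ih _ f l new hm' hnd.2

-- inserting a fresh pair reshapes to one extra reshape step
lemma pv_reshape_insert_fresh (fl : PySem.Dict (String × String) (List Int))
    (f l : String) (v : List Int) (h : fl.contains (f, l) = false) :
    pvReshape (fl.insert (f, l) v) = pvStepR (pvReshape fl) ((f, l), v) := by
  unfold pvReshape
  rw [PySem.Dict.items_insert_of_not_contains _ _ h, List.foldl_append]
  rfl

-- main loop invariant: A's state is the reshape of B's state
lemma pv_main (rows : List (Int × List String)) :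
    ∀ (fl : PySem.Dict (String × String) (List Int)) (dup : List (List String)),
    fl.keys.Nodup →
    rows.foldl pvStepA (pvReshape fl, dup)
      = (pvReshape (rows.foldl pvStepB (fl, dup)).1, (rows.foldl pvStepB (fl, dup)).2) := by
  induction rows with
  | nil => intro fl dup _; rfl
  | cons p rows ih =>
    intro fl dup hnd
    have hkeys : fl.keys = fl.items.map Prod.fst := rfl
    simp only [List.foldl_cons]
    by_cases hc :
        fl.contains (PySem.List.pyGetD p.2 0 "", PySem.List.pyGetD p.2 1 "") = true
    · -- the pair is already in the flat table
      have hmem : (PySem.List.pyGetD p.2 0 "", PySem.List.pyGetD p.2 1 "")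
          ∈ fl.items.map Prod.fst := by
        rw [← hkeys]; exact (PySem.Dict.contains_iff_mem_keys fl _).mp hc
      have hpair : (pvReshape fl).contains (PySem.List.pyGetD p.2 0 "") = true ∧
          ((pvReshape fl).getD (PySem.List.pyGetD p.2 0 "")
              PySem.Dict.empty).contains (PySem.List.pyGetD p.2 1 "") = true := by
        unfold pvReshape
        exact (pv_foldR_contains fl.items PySem.Dict.empty _ _).mpr (Or.inr hmem)
      obtain ⟨v, hv⟩ : ∃ v,
          fl.get? (PySem.List.pyGetD p.2 0 "", PySem.List.pyGetD p.2 1 "") = some v := by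
        have hs := PySem.Dict.contains_eq_isSome_get? fl
          (PySem.List.pyGetD p.2 0 "", PySem.List.pyGetD p.2 1 "")
        rw [hc] at hs
        exact Option.isSome_iff_exists.mp hs.symm
      have hvD : fl.getD (PySem.List.pyGetD p.2 0 "", PySem.List.pyGetD p.2 1 "") [] = v :=
        PySem.Dict.getD_of_get?_eq_some _ _ hv
      have hmemit := PySem.Dict.mem_items_of_get?_eq_some _ hv
      have hval : ((pvReshape fl).getD (PySem.List.pyGetD p.2 0 "")
            PySem.Dict.empty).getD (PySem.List.pyGetD p.2 1 "") [] = v :=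
        pv_foldR_getD fl.items PySem.Dict.empty _ _ v hmemit (hkeys ▸ hnd)
      have hA : pvStepA (pvReshape fl, dup) p
          = ((pvReshape fl).insert (PySem.List.pyGetD p.2 0 "")
                (((pvReshape fl).getD (PySem.List.pyGetD p.2 0 "")
                    PySem.Dict.empty).insert (PySem.List.pyGetD p.2 1 "") (v ++ [p.1])),
              dup ++ [[PySem.List.pyGetD p.2 0 "", PySem.List.pyGetD p.2 1 ""]]) := by
        unfold pvStepA
        simp only [hpair.1, hpair.2, hval, if_true]
      have hB : pvStepB (fl, dup) p
          = (fl.modify (PySem.List.pyGetD p.2 0 "", PySem.List.pyGetD p.2 1 "") []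
                (fun ps => ps ++ [p.1]),
              dup ++ [[PySem.List.pyGetD p.2 0 "", PySem.List.pyGetD p.2 1 ""]]) := by
        unfold pvStepB
        simp only [hc, if_true]
      have hmod : pvReshape (fl.modify
            (PySem.List.pyGetD p.2 0 "", PySem.List.pyGetD p.2 1 "") []
            (fun ps => ps ++ [p.1]))
          = (pvReshape fl).insert (PySem.List.pyGetD p.2 0 "")
              (((pvReshape fl).getD (PySem.List.pyGetD p.2 0 "")
                  PySem.Dict.empty).insert (PySem.List.pyGetD p.2 1 "") (v ++ [p.1])) := by
        show pvReshape (fl.insert (PySem.List.pyGetD p.2 0 "", PySem.List.pyGetD p.2 1 "")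
            ((fl.getD (PySem.List.pyGetD p.2 0 "", PySem.List.pyGetD p.2 1 "") []) ++ [p.1]))
          = _
        unfold pvReshape
        rw [PySem.Dict.items_insert_of_contains _ _ hc, hvD,
          pv_foldR_map_update fl.items PySem.Dict.empty _ _ (v ++ [p.1]) hmem (hkeys ▸ hnd)]
      have hnd' : (fl.modify (PySem.List.pyGetD p.2 0 "", PySem.List.pyGetD p.2 1 "") []
            (fun ps => ps ++ [p.1])).keys.Nodup := by
        rw [PySem.Dict.keys_modify]
        exact PySem.Dict.nodup_keys_insert _ _ _ hnd
      rw [hA, hB, ← hmod]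
      exact ih _ _ hnd'
    · -- fresh pair
      have hcf : fl.contains (PySem.List.pyGetD p.2 0 "", PySem.List.pyGetD p.2 1 "")
          = false := by simpa using hc
      have hB : pvStepB (fl, dup) p
          = (fl.insert (PySem.List.pyGetD p.2 0 "", PySem.List.pyGetD p.2 1 "") [p.1],
              dup) := by
        unfold pvStepB
        simp only [hcf, Bool.false_eq_true, if_false]
      have hnpair : ¬((pvReshape fl).contains (PySem.List.pyGetD p.2 0 "") = true ∧
          ((pvReshape fl).getD (PySem.List.pyGetD p.2 0 "")
              PySem.Dict.empty).contains (PySem.List.pyGetD p.2 1 "") = true) := by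
        unfold pvReshape
        rw [pv_foldR_contains]
        rintro (⟨h1, _⟩ | h1)
        · rw [PySem.Dict.contains_empty] at h1; exact Bool.false_ne_true h1
        · exact hc ((PySem.Dict.contains_iff_mem_keys fl _).mpr (hkeys ▸ h1))
      have hA : pvStepA (pvReshape fl, dup) p
          = (pvStepR (pvReshape fl)
              ((PySem.List.pyGetD p.2 0 "", PySem.List.pyGetD p.2 1 ""), [p.1]), dup) := by
        unfold pvStepA
        rw [pvStepR_eq]
        simp only []
        by_cases hf : (pvReshape fl).contains (PySem.List.pyGetD p.2 0 "") = true
        · have hl : ((pvReshape fl).getD (PySem.List.pyGetD p.2 0 "")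
              PySem.Dict.empty).contains (PySem.List.pyGetD p.2 1 "") = false := by
            by_cases h : ((pvReshape fl).getD (PySem.List.pyGetD p.2 0 "")
                PySem.Dict.empty).contains (PySem.List.pyGetD p.2 1 "") = true
            · exact absurd ⟨hf, h⟩ hnpair
            · simpa using h
          simp [hf, hl]
        · have hgf : (pvReshape fl).contains (PySem.List.pyGetD p.2 0 "") = false := by
            simpa using hf
          simp [hf, PySem.Dict.getD_of_not_contains _ _ hgf]
      rw [hA, hB, ← pv_reshape_insert_fresh fl _ _ [p.1] hcf]
      exact ih _ _ (PySem.Dict.nodup_keys_insert _ _ _ hnd)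

-- ===== VERDICT (by name: the statement is the Claim_ definition above) =====
theorem find_occurance_spec : Claim_equal_find_occurance := by
  intro input _ _
  unfold Spec_find_occurance find_occurance find_occurance_alt
  have he : PySem.List.enumerate input
      = (PySem.List.pyRange 0 (PySem.List.len input)).map
          (fun j => (j, PySem.List.pyGetD input j [])) :=
    PySem.List.enumerate_eq_map_pyRange input []
  rw [he, List.foldl_map]
  have h := pv_main ((PySem.List.pyRange 0 (PySem.List.len input)).map
      (fun j => (j, PySem.List.pyGetD input j []))) PySem.Dict.empty []
    PySem.Dict.nodup_keys_empty
  rw [List.foldl_map,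
      show pvReshape PySem.Dict.empty = PySem.Dict.empty from rfl] at h
  rw [h]
  simp only [List.foldl_map]
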